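-- pv_equiv track=rewrite | github.com/ryeongse25/algorithm | 프로그래머스/2/12973. 짝지어 제거하기/짝지어 제거하기.py | solution
-- ===== SOURCE A (Python) =====
-- def solution(s):
--     stack = []
--     stack.append(s[0])
--     s = s[1:]
--
--     for i in s:
--         stack.append(i)
--         if len(stack) > 1 and stack[-1] == stack[-2]:
--             stack.pop()
--             stack.pop()
--
--     return 0 if stack else 1
-- ===== SOURCE B (Python) =====
-- def _collapse(s):
--     # one left-to-right scan removing each non-overlapping adjacent equal pair
--     out = []
--     i = 0
--     n = len(s)
--     while i < n:
--         if i + 1 < n and s[i] == s[i + 1]: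
--             i += 2
--         else:
--             out.append(s[i])
--             i += 1
--     return ''.join(out)
--
--
-- def solution(s):
--     # repeatedly rewrite the whole string until it stops changing
--     while True:
--         t = _collapse(s)
--         if t == s:
--             break
--         s = t
--     return 1 if not s else 0
-- ===== Notes on version B (the rewrite author's own statement) =====
-- stated objective: alternative
-- what changed: Replaces the single-pass stack with repeated whole-string rewriting: each round one scan deletes every non-overlapping adjacent equal pair, looping until a fixpoint, then tests emptiness.
-- outside the precondition, e.g. on solution(''): A raises IndexError, B returns 1
-- crash fix: On the empty string A raises IndexError (s[0]); B returns 1, the natural answer for an already-empty string. — e.g. on solution(""): A raises IndexError, B returns 1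
import Mathlib
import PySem

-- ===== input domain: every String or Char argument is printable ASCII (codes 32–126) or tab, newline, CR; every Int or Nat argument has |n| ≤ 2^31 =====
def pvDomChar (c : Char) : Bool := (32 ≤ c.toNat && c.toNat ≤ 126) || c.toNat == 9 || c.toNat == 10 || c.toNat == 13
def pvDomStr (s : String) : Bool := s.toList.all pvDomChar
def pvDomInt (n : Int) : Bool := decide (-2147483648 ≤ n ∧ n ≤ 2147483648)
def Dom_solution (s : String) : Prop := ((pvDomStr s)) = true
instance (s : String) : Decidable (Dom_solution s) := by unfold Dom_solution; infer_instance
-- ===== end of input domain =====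

-- B replaces A's single stack pass by repeated whole-string rewriting (delete all
-- non-overlapping adjacent equal pairs per round until a fixpoint); same return value
-- on every non-empty string; on "" A raises IndexError, B returns 1 (see Raises_).

-- ===== PORT A =====
-- stack.append(i); if len(stack) > 1 and stack[-1] == stack[-2]: stack.pop(); stack.pop()
def pvStepA (st : List Char) (i : Char) : List Char :=
  let st := st ++ [i]
  if 1 < st.length ∧ st.getLast? = st.dropLast.getLast? then
    st.dropLast.dropLast
  else
    st

def solution (s : String) : Int :=
  match s.toList with
  | [] => 0   -- Python: s[0] raises IndexError here; excluded by Pre_solution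
  | c :: rest =>
    let stack := rest.foldl pvStepA [c]
    if stack ≠ [] then 0 else 1

-- ===== PORT B =====
-- one scan of _collapse: drop each non-overlapping adjacent equal pair
def pvCollapse : List Char → List Char
  | [] => []
  | [c] => [c]
  | a :: b :: r => if a = b then pvCollapse r else a :: pvCollapse (b :: r)

theorem pvCollapse_len_le : ∀ l : List Char, (pvCollapse l).length ≤ l.length
  | [] => le_refl _
  | [_] => le_refl _
  | a :: b :: r => by
    unfold pvCollapse
    split
    · have := pvCollapse_len_le r; simp; omega
    · have := pvCollapse_len_le (b :: r); simp at this ⊢; omega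

theorem pvCollapse_eq_or_lt : ∀ l : List Char, pvCollapse l = l ∨ (pvCollapse l).length < l.length
  | [] => Or.inl rfl
  | [_] => Or.inl rfl
  | a :: b :: r => by
    unfold pvCollapse
    split
    · right; have := pvCollapse_len_le r; simp; omega
    · rcases pvCollapse_eq_or_lt (b :: r) with h | h
      · left; rw [h]
      · right; simpa using Nat.succ_lt_succ h

-- the while-True fixpoint loop of B
def pvLoop (l : List Char) : List Char :=
  let t := pvCollapse l
  if t = l then l else pvLoop t
termination_by l.length
decreasing_by
  rename_i h
  rcases pvCollapse_eq_or_lt l with h' | h'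
  · exact absurd h' h
  · exact h'

def solution_alt (s : String) : Int :=
  if (pvLoop s.toList) = [] then 1 else 0

-- ===== PRECONDITION & SPEC =====
def Pre_solution (s : String) : Prop := s ≠ ""
instance (s : String) : Decidable (Pre_solution s) := by unfold Pre_solution; infer_instance
def pvWitness_solution : String := "baab"

-- On the empty string A raises IndexError (s[0]); B returns 1.
def Raises_solution (s : String) : Prop := s = ""
instance (s : String) : Decidable (Raises_solution s) := by unfold Raises_solution; infer_instance
def pvRaiseWitness_solution : String := ""
def pvRaiseWitnessOut_solution : Int := 1

def Spec_solution (s : String) (out : Int) : Prop := out = solution_alt s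
instance (s : String) (out : Int) : Decidable (Spec_solution s out) := by unfold Spec_solution; infer_instance

-- ===== CLAIM (what is proved, stated in full; the proofs are below) =====
def Claim_equal_solution : Prop := ∀ (s : String), Dom_solution s → Pre_solution s → Spec_solution s (solution s)
def Claim_raises_solution : Prop := (∀ (s : String), Dom_solution s → Raises_solution s → ¬ Pre_solution s) ∧ (Dom_solution (pvRaiseWitness_solution) ∧ Raises_solution (pvRaiseWitness_solution) ∧ solution_alt (pvRaiseWitness_solution) = pvRaiseWitnessOut_solution)

-- ===== LEMMAS AND PROOFS =====

-- the stack step with the stack reversed (top at the head)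
def pvStep (st : List Char) (c : Char) : List Char :=
  match st with
  | [] => [c]
  | a :: t => if a = c then t else c :: a :: t

theorem pvStepA_eq_rev (st : List Char) (c : Char) :
    pvStepA st c = (pvStep st.reverse c).reverse := by
  rcases h : st.reverse with _ | ⟨a, t⟩
  · have : st = [] := by simpa using congrArg List.reverse h
    subst this
    simp [pvStepA, pvStep]
  · have hst : st = t.reverse ++ [a] := by
      have := congrArg List.reverse h; simpa using this
    subst hst
    simp only [pvStepA, pvStep]
    by_cases hac : a = c
    · subst hac
      simp [List.dropLast_concat]
    · have h1 : ((t.reverse ++ [a]) ++ [c]).getLast? = some c := by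
        simp [List.getLast?_concat]
      have h2 : ((t.reverse ++ [a]) ++ [c]).dropLast.getLast? = some a := by
        simp [List.dropLast_concat, List.getLast?_concat]
      rw [if_neg, if_neg]
      · simp
      · exact fun hc => hac hc
      · intro hand
        rw [h1, h2] at hand
        exact hac (Option.some.inj hand.2).symm

theorem foldlA_eq_rev (l : List Char) (st : List Char) :
    l.foldl pvStepA st = (l.foldl pvStep st.reverse).reverse := by
  induction l generalizing st with
  | nil => simp
  | cons c r ih =>
    simp only [List.foldl_cons, pvStepA_eq_rev]
    rw [ih]
    simp

-- a stack built by pvStep never has two equal adjacent elements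
theorem pvStep_chain {st : List Char} (h : List.IsChain (· ≠ ·) st) (c : Char) :
    List.IsChain (· ≠ ·) (pvStep st c) := by
  rcases st with _ | ⟨a, t⟩
  · simp only [pvStep, List.isChain_singleton]
  · simp only [pvStep]
    split
    · exact List.isChain_of_isChain_cons h
    · exact List.isChain_cons_cons.mpr ⟨by rename_i hne; exact fun he => hne he.symm, h⟩

-- pushing the same char twice onto a reduced stack is a no-op
theorem pvStep_cancel {st : List Char} (h : List.IsChain (· ≠ ·) st) (a : Char) :
    pvStep (pvStep st a) a = st := by
  rcases st with _ | ⟨b, t⟩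
  · simp [pvStep]
  · simp only [pvStep]
    by_cases hba : b = a
    · subst hba
      rcases t with _ | ⟨d, u⟩
      · simp
      · have hbd : b ≠ d := (List.isChain_cons_cons.mp h).1
        simp [Ne.symm hbd]
    · simp [hba]

-- one collapse round does not change the resulting stack
theorem foldl_pvStep_collapse : ∀ (l : List Char) (st : List Char),
    List.IsChain (· ≠ ·) st → (pvCollapse l).foldl pvStep st = l.foldl pvStep st
  | [], _, _ => rfl
  | [_], _, _ => rfl
  | a :: b :: r, st, h => by
    unfold pvCollapse
    split
    · rename_i hab
      subst hab
      rw [foldl_pvStep_collapse r st h]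
      simp only [List.foldl_cons]
      rw [pvStep_cancel h]
    · simp only [List.foldl_cons]
      exact foldl_pvStep_collapse (b :: r) (pvStep st a) (pvStep_chain h a)

-- the whole rewrite loop does not change the resulting stack
theorem foldl_pvStep_loop (l : List Char) (st : List Char)
    (h : List.IsChain (· ≠ ·) st) : (pvLoop l).foldl pvStep st = l.foldl pvStep st := by
  rw [pvLoop]
  split
  · rfl
  · rw [foldl_pvStep_loop (pvCollapse l) st h, foldl_pvStep_collapse l st h]
termination_by l.length
decreasing_by
  rename_i hne
  rcases pvCollapse_eq_or_lt l with h' | h'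
  · exact absurd h' hne
  · exact h'

-- a fixpoint of pvCollapse has no equal adjacent pair
theorem collapse_fix_chain : ∀ l : List Char, pvCollapse l = l → List.IsChain (· ≠ ·) l
  | [], _ => List.IsChain.nil
  | [c], _ => List.isChain_singleton c
  | a :: b :: r, h => by
    unfold pvCollapse at h
    split at h
    · exfalso
      have h1 := pvCollapse_len_le r
      have h2 := congrArg List.length h
      simp at h2
      omega
    · rename_i hab
      have htail : pvCollapse (b :: r) = b :: r := (List.cons.inj h).2
      exact List.isChain_cons_cons.mpr ⟨hab, collapse_fix_chain (b :: r) htail⟩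

-- pvLoop's output is a fixpoint of pvCollapse
theorem pvLoop_fix (l : List Char) : pvCollapse (pvLoop l) = pvLoop l := by
  rw [pvLoop]
  split
  · rename_i h; exact h
  · exact pvLoop_fix (pvCollapse l)
termination_by l.length
decreasing_by
  rename_i hne
  rcases pvCollapse_eq_or_lt l with h' | h'
  · exact absurd h' hne
  · exact h'

-- folding pvStep over a string with no equal adjacent pair just reverses it
theorem foldl_pvStep_chain : ∀ (l : List Char) (st : List Char),
    List.IsChain (· ≠ ·) l →
    (∀ a b, l.head? = some a → st.head? = some b → a ≠ b) →
    l.foldl pvStep st = l.reverse ++ st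
  | [], _, _, _ => by simp
  | c :: r, st, hc, hne => by
    have hstep : pvStep st c = c :: st := by
      rcases st with _ | ⟨b, t⟩
      · simp [pvStep]
      · have hcb : c ≠ b := hne c b rfl rfl
        simp only [pvStep]
        rw [if_neg (fun h => hcb h.symm)]
    simp only [List.foldl_cons, hstep]
    rw [foldl_pvStep_chain r (c :: st) (List.isChain_of_isChain_cons hc)]
    · simp
    · intro a b ha hb
      have : c = b := by simpa using hb
      subst this
      rcases r with _ | ⟨d, u⟩
      · simp at ha
      · have hcd : c ≠ d := (List.isChain_cons_cons.mp hc).1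
        simp only [List.head?_cons, Option.some.injEq] at ha
        exact fun h => hcd (by rw [ha]; exact h.symm)

theorem foldl_pvStep_eq_loop_rev (l : List Char) :
    l.foldl pvStep [] = (pvLoop l).reverse := by
  rw [← foldl_pvStep_loop l [] List.IsChain.nil]
  rw [foldl_pvStep_chain (pvLoop l) []
      (collapse_fix_chain _ (pvLoop_fix l)) (by intro a b _ hb; simp at hb)]
  simp

theorem pvLoop_nil : pvLoop [] = [] := by
  rw [pvLoop]; simp [pvCollapse]

-- ===== VERDICT (by name: the statement is the Claim_ definition above) =====
theorem solution_spec : Claim_equal_solution := by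
  intro s _ hpre
  unfold Spec_solution solution solution_alt
  rcases h : s.toList with _ | ⟨c, rest⟩
  · exact absurd (String.toList_eq_nil_iff.mp h) hpre
  · simp only [h]
    have hfold : rest.foldl pvStepA [c] = pvLoop (c :: rest) := by
      rw [foldlA_eq_rev]
      have : List.reverse [c] = [c] := rfl
      rw [this]
      have : rest.foldl pvStep [c] = (c :: rest).foldl pvStep [] := by
        simp [List.foldl_cons, pvStep]
      rw [this, foldl_pvStep_eq_loop_rev]
      simp
    rw [hfold]
    by_cases he : pvLoop (c :: rest) = []
    · simp [he]
    · simp [he]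

@[simp] theorem solution_raises : Claim_raises_solution := by
  unfold Claim_raises_solution
  refine ⟨fun s _ h hp => hp h, by decide, by decide, ?_⟩
  show solution_alt "" = 1
  unfold solution_alt
  have : ("" : String).toList = [] := rfl
  rw [this, pvLoop_nil]
  rfl
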